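-- pv_equiv track=rewrite | github.com/std-modelware/polytech-diskrete-2020 | ShagvalievMi/kaprekar-routine.py | build_kaprekar_sequence
-- ===== SOURCE A (Python) =====
-- import enum
--
-- class Error(enum.Enum):
--     ERROR_OK = 0
--     ERROR_NUM_OVER = 1
--
-- def build_kaprekar_sequence(number_list, digits_n, base):
--     len_way = 0     # number of elements in sequence but not in cycle
--     len_loop = 0    # number of elements in cycle
--     sequence = []   # current kaprekar sequence, each element of sequence is num_int
--     num_int = convert_list_to_int(number_list, digits_n, base)
--     sequence.append(num_int)
--     new_number_list = number_list.copy()    # number to be iterated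
--     while True:
--         new_number_list, new_number_int = kaprekar(new_number_list, digits_n, base)
--         if sequence.count(new_number_int):
--             len_way = sequence.index(new_number_int)
--             len_loop = len(sequence) - len_way
--             break
--         else:
--             sequence.append(new_number_int)
--     loop = sequence[-len_loop:]     # detected loop (m.b. out of 1 element)
--     return len_way, loop
--
-- def kaprekar(num_list, digits_n, base):
--     max_num_int = convert_list_to_int(list(sorted(num_list)), digits_n, base)
--     # max number constructed out of sorted digits of input number
--     min_num_int = convert_list_to_int(list(sorted(num_list, reverse=True)), digits_n, base)
--     # min number constructed out of sorted digits of input number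
--     new_num_int = max_num_int - min_num_int     # new number ( K(i, d, r) )
--     err, new_num_list = convert_int_to_list(new_num_int, digits_n, base)
--     return new_num_list, new_num_int
--
-- def convert_int_to_list(num_int, digits_n, base):
--     num_list = []
--     if num_int == 0:
--         num_list = [0] * digits_n
--         return Error.ERROR_OK, num_list
--     actual_number_of_digits = 1     # "real" number of digits in representation of num_int
--     # in a certain numeral system (base) w certain number of digits (digits_n)
--     while num_int > 0:
--         if actual_number_of_digits > digits_n:
--             return Error.ERROR_NUM_OVER, num_list
--         num_int, mod = divmod(num_int, base)
--         actual_number_of_digits += 1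
--         num_list.append(mod)
--     for i in range(actual_number_of_digits, digits_n+1):
--         num_list.append(0)
--     return Error.ERROR_OK, num_list
--
-- def convert_list_to_int(number_list, digits_n, base):
--     num_int = 0
--     for i in range(digits_n):
--         num_int += number_list[i] * (base ** i)
--     return num_int
-- ===== SOURCE B (Python) =====
-- def build_kaprekar_sequence(number_list, digits_n, base):
--     # Memoryless cycle detection: stores no sequence; every membership test re-runs
--     # the orbit from the start, and the loop is regenerated by stepping (O(1) space).
--     def value_of(lst):
--         s = sorted(lst)
--         return sum((s[i] - s[-1 - i]) * base ** i for i in range(digits_n))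
--
--     def digits_of(n):
--         out = []
--         for _ in range(max(digits_n, 0)):
--             n, m = divmod(n, base) if n > 0 else (n, 0)
--             out.append(m)
--         return out
--
--     def orbit(k):
--         # k-th orbit value: x0 read off the raw input list, then k Kaprekar steps
--         v = sum(number_list[i] * base ** i for i in range(digits_n))
--         lst = number_list
--         for _ in range(k):
--             v = value_of(lst)
--             lst = digits_of(v)
--         return v
--
--     k = 1
--     while True:
--         v = orbit(k)
--         j = 0
--         while orbit(j) != v:
--             j += 1
--         if j < k:
--             # first repeat: tail of length j, then the k-j cycle values from orbit(j)
--             return j, [orbit(j + t) for t in range(k - j)]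
--         k += 1
-- ===== Notes on version B (the rewrite author's own statement) =====
-- stated objective: alternative
-- what changed: B eliminates A's stored sequence entirely: instead of appending each value to a list and scanning it with count()/index(), B keeps only the step counter, decides whether the k-th orbit value repeats by re-running the orbit from the start (an orbit(k) recomputation function), and regenerates the cycle by stepping again from the first repeated index, trading A's O(L) extra memory for O(1) space at O(L^3) recomputation time; each Kaprekar value comes from one sort via the symmetric digit differences s[i]-s[-1-i] instead of A's two sorts and int round-trip.
import Mathlib
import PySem

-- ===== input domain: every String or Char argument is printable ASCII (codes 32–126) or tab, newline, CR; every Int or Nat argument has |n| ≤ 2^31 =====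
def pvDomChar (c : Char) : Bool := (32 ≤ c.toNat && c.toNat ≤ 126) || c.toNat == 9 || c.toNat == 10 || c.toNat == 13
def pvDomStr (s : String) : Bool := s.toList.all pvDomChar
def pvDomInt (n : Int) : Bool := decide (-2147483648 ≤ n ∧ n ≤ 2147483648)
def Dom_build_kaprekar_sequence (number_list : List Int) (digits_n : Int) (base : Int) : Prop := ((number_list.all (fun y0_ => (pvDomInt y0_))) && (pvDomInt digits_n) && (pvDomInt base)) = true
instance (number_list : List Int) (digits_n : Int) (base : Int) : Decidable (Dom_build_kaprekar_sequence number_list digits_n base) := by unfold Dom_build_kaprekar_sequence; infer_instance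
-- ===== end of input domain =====

-- B stores no sequence: it tests each new Kaprekar value by re-running the orbit from
-- the start and regenerates the cycle by stepping (constant-space recomputation instead
-- of A's stored-list count/index scans); equivalence proved on digits_n ≤ len(number_list).


-- ===== PORT A =====
inductive KError
  | ok
  | over
deriving DecidableEq, Repr

-- convert_list_to_int: num_int += number_list[i] * base**i over range(digits_n)
def convert_list_to_int (number_list : List Int) (digits_n : Int) (base : Int) : Int :=
  (PySem.List.pyRange 0 digits_n 1).foldl
    (fun num_int i => num_int + PySem.List.pyGetD number_list i 0 * base ^ i.toNat) 0

-- the 'while num_int > 0' loop of convert_int_to_list; fuel is a totality guard only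
-- (digits_n.toNat + 1 suffices since each pass increments `actual`, bounded by digits_n);
-- the divmod? none branch (ZeroDivision) is unreachable: base = 0 forces num_int ≤ 0 here
def citl_loop (digits_n base : Int) : Nat → Int → Int → List Int → KError × List Int
  | 0, _, _, num_list => (KError.over, num_list)
  | fuel + 1, num_int, actual, num_list =>
    if num_int > 0 then
      if actual > digits_n then (KError.over, num_list)
      else
        match PySem.Int.divmod? num_int base with
        | some (q, m) => citl_loop digits_n base fuel q (actual + 1) (num_list ++ [m])
        | none => citl_loop digits_n base fuel num_int (actual + 1) (num_list ++ [0])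
    else
      (KError.ok, num_list ++ (PySem.List.pyRange actual (digits_n + 1) 1).map (fun _ => (0 : Int)))

def convert_int_to_list (num_int digits_n base : Int) : KError × List Int :=
  if num_int = 0 then (KError.ok, List.replicate digits_n.toNat 0)
  else citl_loop digits_n base (digits_n.toNat + 1) num_int 1 []

def kaprekar (num_list : List Int) (digits_n base : Int) : List Int × Int :=
  let max_num_int := convert_list_to_int (PySem.List.sorted num_list (fun x => x) false) digits_n base
  let min_num_int := convert_list_to_int (PySem.List.sorted num_list (fun x => x) true) digits_n base
  let new_num_int := max_num_int - min_num_int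
  let r := convert_int_to_list new_num_int digits_n base
  (r.2, new_num_int)

-- the 'while True' loop of A; fuel is a totality guard only (the repeat test ends the loop)
def a_loop (digits_n base : Int) : Nat → List Int → List Int → Int × List Int
  | 0, _, _ => (0, [])
  | fuel + 1, sequence, cur =>
    let p := kaprekar cur digits_n base
    if PySem.List.count sequence p.2 ≠ 0 then
      let len_way : Int := (((PySem.List.index? sequence p.2).getD 0 : Nat) : Int)
      let len_loop : Int := (sequence.length : Int) - len_way
      (len_way, PySem.List.slice sequence (some (-len_loop)) none)
    else a_loop digits_n base fuel (sequence ++ [p.2]) p.1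

def build_kaprekar_sequence (number_list : List Int) (digits_n : Int) (base : Int) : Int × List Int :=
  let num_int := convert_list_to_int number_list digits_n base
  a_loop digits_n base 2000000000 [num_int] number_list

-- ===== PORT B =====
-- digits_of: for _ in range(max(digits_n,0)): append divmod digit while n > 0, else 0
-- (the divmod? none branch (ZeroDivision) is unreachable: base = 0 forces n ≤ 0 here)
def kapDigits_loop (base : Int) : Nat → Int → List Int → List Int
  | 0, _, out => out
  | fuel + 1, n, out =>
    if n > 0 then
      match PySem.Int.divmod? n base with
      | some (q, m) => kapDigits_loop base fuel q (out ++ [m])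
      | none => kapDigits_loop base fuel n (out ++ [0])
    else kapDigits_loop base fuel n (out ++ [0])

def kapDigits (n digits_n base : Int) : List Int := kapDigits_loop base digits_n.toNat n []

-- value_of: sum((s[i] - s[-1-i]) * base**i for i in range(digits_n)) with s = sorted(lst)
def kapValue (cur : List Int) (digits_n base : Int) : Int :=
  let s := PySem.List.sorted cur (fun x => x) false
  (PySem.List.pyRange 0 digits_n 1).foldl
    (fun acc i =>
      acc + (PySem.List.pyGetD s i 0 - PySem.List.pyGetD s ((s.length : Int) - 1 - i) 0) * base ^ i.toNat) 0

-- orbit(k): v,lst := x0,number_list then k iterations of v := value_of(lst); lst := digits_of(v);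
-- ported as structural recursion on k carrying the same (v, lst) state; orbit k = (orbitPair k).1
def orbitPair (number_list : List Int) (digits_n base : Int) : Nat → Int × List Int
  | 0 => ((PySem.List.pyRange 0 digits_n 1).foldl
            (fun v i => v + PySem.List.pyGetD number_list i 0 * base ^ i.toNat) 0,
          number_list)
  | k + 1 =>
    let p := orbitPair number_list digits_n base k
    let v := kapValue p.2 digits_n base
    (v, kapDigits v digits_n base)

-- the inner 'while orbit(j) != v: j += 1'; fuel k+1 provably suffices since orbit(k) = v
def innerFind (number_list : List Int) (digits_n base v : Int) : Nat → Nat → Nat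
  | 0, j => j
  | fuel + 1, j =>
    if (orbitPair number_list digits_n base j).1 ≠ v then
      innerFind number_list digits_n base v fuel (j + 1)
    else j

-- the outer 'while True' of B; fuel is a totality guard only
def bk_loop (number_list : List Int) (digits_n base : Int) : Nat → Nat → Int × List Int
  | 0, _ => (0, [])
  | fuel + 1, k =>
    let v := (orbitPair number_list digits_n base k).1
    let j := innerFind number_list digits_n base v (k + 1) 0
    if j < k then
      ((j : Int), (List.range (k - j)).map (fun t => (orbitPair number_list digits_n base (j + t)).1))
    else bk_loop number_list digits_n base fuel (k + 1)

def build_kaprekar_sequence_alt (number_list : List Int) (digits_n : Int) (base : Int) : Int × List Int :=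
  bk_loop number_list digits_n base 2000000000 1

-- ===== PRECONDITION & SPEC =====
-- Pre_: digits_n ≤ len(number_list) — exactly where A's convert_list_to_int avoids its IndexError
def Pre_build_kaprekar_sequence (number_list : List Int) (digits_n : Int) (base : Int) : Prop :=
  digits_n ≤ (number_list.length : Int)
instance (number_list : List Int) (digits_n : Int) (base : Int) : Decidable (Pre_build_kaprekar_sequence number_list digits_n base) := by unfold Pre_build_kaprekar_sequence; infer_instance

def pvWitness_build_kaprekar_sequence : List Int × Int × Int := ([4, 2, 1], 3, 10)

def Spec_build_kaprekar_sequence (number_list : List Int) (digits_n : Int) (base : Int) (out : Int × List Int) : Prop := out = build_kaprekar_sequence_alt number_list digits_n base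
instance (number_list : List Int) (digits_n : Int) (base : Int) (out : Int × List Int) : Decidable (Spec_build_kaprekar_sequence number_list digits_n base out) := by unfold Spec_build_kaprekar_sequence; infer_instance

-- ===== CLAIM (what is proved, stated in full; the proofs are below) =====
def Claim_equal_build_kaprekar_sequence : Prop := ∀ (number_list : List Int) (digits_n : Int) (base : Int), Dom_build_kaprekar_sequence number_list digits_n base → Pre_build_kaprekar_sequence number_list digits_n base → Spec_build_kaprekar_sequence number_list digits_n base (build_kaprekar_sequence number_list digits_n base)

-- ===== LEMMAS AND PROOFS =====

-- B's digit loop on an exhausted (nonpositive) n only pads zeros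
theorem kapDigits_loop_nonpos (base : Int) (f : Nat) :
    ∀ (n : Int) (acc : List Int), n ≤ 0 →
      kapDigits_loop base f n acc = acc ++ List.replicate f 0 := by
  induction f with
  | zero => simp [kapDigits_loop]
  | succ f ih =>
    intro n acc h
    simp only [kapDigits_loop, if_neg (by omega : ¬ n > 0)]
    rw [ih n _ h]
    simp [List.replicate_succ]

-- A's conversion loop and B's digit loop produce the same list
theorem citl_loop_eq_kapDigits_loop (digits_n base : Int) (f : Nat) :
    ∀ (n actual : Int) (acc : List Int), actual = digits_n + 1 - (f : Int) →
      (citl_loop digits_n base (f + 1) n actual acc).2 = kapDigits_loop base f n acc := by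
  induction f with
  | zero =>
    intro n actual acc h
    push_cast at h
    conv_lhs => rw [citl_loop]
    by_cases h1 : n > 0
    · rw [if_pos h1, if_pos (by omega : actual > digits_n)]
      simp [kapDigits_loop]
    · rw [if_neg h1, PySem.List.pyRange_one_eq_nil (by omega)]
      simp [kapDigits_loop]
  | succ f ih =>
    intro n actual acc h
    push_cast at h
    conv_lhs => rw [citl_loop]
    conv_rhs => rw [kapDigits_loop]
    by_cases h1 : n > 0
    · rw [if_pos h1, if_pos h1, if_neg (by omega : ¬ actual > digits_n)]
      rcases hd : PySem.Int.divmod? n base with _ | ⟨q, m⟩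
      · exact ih n (actual + 1) (acc ++ [0]) (by omega)
      · exact ih q (actual + 1) (acc ++ [m]) (by omega)
    · rw [if_neg h1, if_neg h1]
      rw [kapDigits_loop_nonpos base f n (acc ++ [0]) (by omega)]
      have hlen : (PySem.List.pyRange actual (digits_n + 1) 1).length = f + 1 := by
        rw [PySem.List.length_pyRange_one]; omega
      rw [List.map_const', hlen]
      simp [List.replicate_succ]

theorem citl_eq_kapDigits (n digits_n base : Int) :
    (convert_int_to_list n digits_n base).2 = kapDigits n digits_n base := by
  unfold convert_int_to_list kapDigits
  by_cases hd : 0 ≤ digits_n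
  · split_ifs with h0
    · rw [kapDigits_loop_nonpos base _ n [] (by omega)]; simp
    · exact citl_loop_eq_kapDigits_loop digits_n base digits_n.toNat n 1 [] (by omega)
  · have ht : digits_n.toNat = 0 := by omega
    rw [ht]
    split_ifs with h0
    · simp [kapDigits_loop]
    · conv_lhs => rw [citl_loop]
      by_cases h1 : n > 0
      · rw [if_pos h1, if_pos (by omega : (1:Int) > digits_n)]
        simp [kapDigits_loop]
      · rw [if_neg h1, PySem.List.pyRange_one_eq_nil (by omega)]
        simp [kapDigits_loop]

theorem kapDigits_loop_length (base : Int) (f : Nat) :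
    ∀ (n : Int) (acc : List Int), (kapDigits_loop base f n acc).length = acc.length + f := by
  induction f with
  | zero => simp [kapDigits_loop]
  | succ f ih =>
    intro n acc
    simp only [kapDigits_loop]
    split_ifs with h1
    · rcases hd : PySem.Int.divmod? n base with _ | ⟨q, m⟩
      · rw [ih]; simp; omega
      · rw [ih]; simp; omega
    · rw [ih]; simp; omega

theorem kapDigits_length (n digits_n base : Int) :
    (kapDigits n digits_n base).length = digits_n.toNat := by
  unfold kapDigits
  rw [kapDigits_loop_length]; simp

-- sorted(xs, reverse=True) is the reversal of sorted(xs) for integer values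
theorem sorted_rev_eq_reverse (xs : List Int) :
    PySem.List.sorted xs (fun x => x) true = (PySem.List.sorted xs (fun x => x) false).reverse := by
  apply PySem.List.eq_of_perm_of_pairwise_le_of_injective (key := fun x => -x)
  · exact neg_injective
  · exact ((PySem.List.sorted_perm xs _ true).trans ((PySem.List.sorted_perm xs _ false).symm)).trans (List.reverse_perm _).symm
  · have := PySem.List.sorted_pairwise_rev (xs := xs) (key := fun x : Int => x)
    exact this.imp (by intro a b h; simpa using h)
  · have := PySem.List.sorted_pairwise (xs := xs) (key := fun x : Int => x)
    rw [List.pairwise_reverse]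
    exact this.imp (by intro a b h; simpa using h)

theorem sum_map_sub_int (l : List Int) (f g : Int → Int) :
    (l.map (fun x => f x - g x)).sum = (l.map f).sum - (l.map g).sum := by
  induction l with
  | nil => simp
  | cons a t ih => simp [ih]; ring

-- A's max-min Kaprekar value equals B's one-sort symmetric-difference sum
theorem kaprekar_snd_eq_kapValue (cur : List Int) (digits_n base : Int)
    (hlen : digits_n ≤ (cur.length : Int)) :
    (kaprekar cur digits_n base).2 = kapValue cur digits_n base := by
  show convert_list_to_int (PySem.List.sorted cur (fun x => x) false) digits_n base
      - convert_list_to_int (PySem.List.sorted cur (fun x => x) true) digits_n base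
      = kapValue cur digits_n base
  rw [sorted_rev_eq_reverse]
  unfold kapValue convert_list_to_int
  have hlen' : digits_n ≤ ((PySem.List.sorted cur (fun x => x) false).length : Int) := by
    rw [PySem.List.length_sorted]; exact hlen
  generalize PySem.List.sorted cur (fun x => x) false = s at hlen' ⊢
  rw [PySem.List.foldl_add, PySem.List.foldl_add, PySem.List.foldl_add]
  simp only [zero_add]
  rw [← sum_map_sub_int]
  apply congrArg
  apply List.map_congr_left
  intro i hi
  rw [PySem.List.mem_pyRange_one] at hi
  have h1 : i < (s.length : Int) := lt_of_lt_of_le hi.2 hlen'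
  have h0 : (0 : Int) ≤ i := hi.1
  have hrl : i < (s.reverse.length : Int) := by simpa using h1
  rw [PySem.List.pyGetD_eq_getElem s 0 h0 h1,
      PySem.List.pyGetD_eq_getElem s.reverse 0 h0 hrl,
      PySem.List.pyGetD_eq_getElem s 0 (by omega) (by omega)]
  rw [List.getElem_reverse]
  have he : s[s.length - 1 - i.toNat]'(by omega) = s[((s.length : Int) - 1 - i).toNat]'(by omega) := by
    congr 1
    omega
  rw [he]
  ring

-- every orbit list is long enough for kaprekar/kapValue agreement
theorem orbit_len (number_list : List Int) (digits_n base : Int)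
    (hpre : digits_n ≤ (number_list.length : Int)) :
    ∀ k, digits_n ≤ (((orbitPair number_list digits_n base k).2).length : Int) := by
  intro k
  cases k with
  | zero => exact hpre
  | succ k =>
    show digits_n ≤ ((kapDigits _ digits_n base).length : Int)
    rw [kapDigits_length]
    omega

-- one A-step from the k-th orbit list is the (k+1)-st orbit pair (value and list)
theorem kaprekar_orbit (number_list : List Int) (digits_n base : Int)
    (hpre : digits_n ≤ (number_list.length : Int)) (k : Nat) :
    kaprekar ((orbitPair number_list digits_n base k).2) digits_n base
      = ((orbitPair number_list digits_n base (k + 1)).2,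
         (orbitPair number_list digits_n base (k + 1)).1) := by
  have hv : (kaprekar ((orbitPair number_list digits_n base k).2) digits_n base).2
      = (orbitPair number_list digits_n base (k + 1)).1 := by
    rw [kaprekar_snd_eq_kapValue _ _ _ (orbit_len number_list digits_n base hpre k)]
    rfl
  have hl : (kaprekar ((orbitPair number_list digits_n base k).2) digits_n base).1
      = (orbitPair number_list digits_n base (k + 1)).2 := by
    show (convert_int_to_list
        ((kaprekar ((orbitPair number_list digits_n base k).2) digits_n base).2) digits_n base).2 = _
    rw [hv, citl_eq_kapDigits]
    rfl
  exact Prod.ext hl hv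

-- innerFind starting at j finds the least j0 ≥ j with orbit j0 = v, given enough fuel
theorem innerFind_eq (number_list : List Int) (digits_n base v : Int) (f : Nat) :
    ∀ (j j0 : Nat), j ≤ j0 → j0 < j + f →
      (orbitPair number_list digits_n base j0).1 = v →
      (∀ i, j ≤ i → i < j0 → (orbitPair number_list digits_n base i).1 ≠ v) →
      innerFind number_list digits_n base v f j = j0 := by
  induction f with
  | zero => intro j j0 h1 h2 _ _; omega
  | succ f ih =>
    intro j j0 h1 h2 hv hmin
    rw [innerFind]
    by_cases hj : j = j0
    · subst hj
      rw [if_neg (by simpa using hv)]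
    · rw [if_pos (by exact hmin j le_rfl (by omega))]
      exact ih (j + 1) j0 (by omega) (by omega) hv (fun i hi1 hi2 => hmin i (by omega) hi2)

-- the sequence A stores at step k is the first k orbit values
theorem index?_orbit (number_list : List Int) (digits_n base : Int) (k j0 : Nat)
    (hj : j0 < k)
    (hv : (orbitPair number_list digits_n base j0).1 = (orbitPair number_list digits_n base k).1)
    (hmin : ∀ i, i < j0 →
      (orbitPair number_list digits_n base i).1 ≠ (orbitPair number_list digits_n base k).1) :
    PySem.List.index? ((List.range k).map (fun i => (orbitPair number_list digits_n base i).1))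
      ((orbitPair number_list digits_n base k).1) = some j0 := by
  obtain ⟨r, rfl⟩ : ∃ r, k = j0 + 1 + r := ⟨k - j0 - 1, by omega⟩
  rw [PySem.List.index?_eq_some_iff]
  refine ⟨(List.range j0).map (fun i => (orbitPair number_list digits_n base i).1),
          ((List.range r).map (fun t => (orbitPair number_list digits_n base (j0 + 1 + t)).1)), ?_, by simp, ?_⟩
  · rw [List.range_add, List.range_add]
    simp [List.map_map, Function.comp, hv]
  · intro hmem
    rw [List.mem_map] at hmem
    obtain ⟨i, hi, hie⟩ := hmem
    rw [List.mem_range] at hi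
    exact hmin i hi hie

-- dropping j0 of the first-k-orbit-values list gives B's regenerated cycle
theorem drop_orbit (number_list : List Int) (digits_n base : Int) (k j0 : Nat) (hj : j0 ≤ k) :
    ((List.range k).map (fun i => (orbitPair number_list digits_n base i).1)).drop j0
      = (List.range (k - j0)).map (fun t => (orbitPair number_list digits_n base (j0 + t)).1) := by
  have hk : k = j0 + (k - j0) := by omega
  rw [hk, List.range_add]
  simp [List.map_map, Function.comp]

-- main lockstep simulation: A's loop on (first m+1 orbit values, m-th orbit list) is B's loop at k = m+1
theorem a_loop_eq_bk_loop (number_list : List Int) (digits_n base : Int)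
    (hpre : digits_n ≤ (number_list.length : Int)) (fuel : Nat) :
    ∀ (m : Nat),
      a_loop digits_n base fuel
        ((List.range (m + 1)).map (fun i => (orbitPair number_list digits_n base i).1))
        ((orbitPair number_list digits_n base m).2)
      = bk_loop number_list digits_n base fuel (m + 1) := by
  induction fuel with
  | zero => intro _; rfl
  | succ fuel ih =>
    intro m
    conv_lhs => rw [a_loop]
    conv_rhs => rw [bk_loop]
    rw [kaprekar_orbit number_list digits_n base hpre m]
    set v := (orbitPair number_list digits_n base (m + 1)).1 with hvdef
    -- j0: the least index whose orbit value is v (well-defined: index m+1 works)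
    have hex : ∃ j, (orbitPair number_list digits_n base j).1 = v := ⟨m + 1, rfl⟩
    set j0 := Nat.find hex with hj0def
    have hj0v : (orbitPair number_list digits_n base j0).1 = v := Nat.find_spec hex
    have hj0min : ∀ i, i < j0 → (orbitPair number_list digits_n base i).1 ≠ v :=
      fun i hi => Nat.find_min hex hi
    have hj0le : j0 ≤ m + 1 := Nat.find_min' hex rfl
    have hfind : innerFind number_list digits_n base v (m + 1 + 1) 0 = j0 :=
      innerFind_eq number_list digits_n base v (m + 2) 0 j0 (by omega) (by omega) hj0v
        (fun i _ hi => hj0min i hi)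
    rw [hfind]
    by_cases hlt : j0 < m + 1
    · -- repeat found: both stop with (j0, orbit values j0 .. m)
      have hidx := index?_orbit number_list digits_n base (m + 1) j0 hlt hj0v hj0min
      have hmem : v ∈ (List.range (m + 1)).map (fun i => (orbitPair number_list digits_n base i).1) := by
        exact (PySem.List.index?_isSome_iff _ _).1 (by rw [hidx]; rfl)
      have hcnt : ¬ PySem.List.count
          ((List.range (m + 1)).map (fun i => (orbitPair number_list digits_n base i).1)) v = 0 := by
        rw [PySem.List.count_eq]
        simpa [List.count_eq_zero] using hmem
      rw [if_pos hcnt, if_pos hlt, hidx]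
      simp only [Option.getD_some, List.length_map, List.length_range]
      have hneg : -(((m + 1 : Nat) : Int) - ((j0 : Nat) : Int)) = -(((m + 1 - j0 : Nat) : Int)) := by
        omega
      rw [hneg, PySem.List.slice_from_neg_natCast _ (m + 1 - j0) (by simp; omega)]
      simp only [List.length_map, List.length_range]
      have harith : m + 1 - (m + 1 - j0) = j0 := by omega
      rw [harith, drop_orbit number_list digits_n base (m + 1) j0 (by omega)]
    · -- fresh value: both continue; A appends orbit (m+1) to its sequence
      have hj0 : j0 = m + 1 := by omega
      have hnmem : v ∉ (List.range (m + 1)).map (fun i => (orbitPair number_list digits_n base i).1) := by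
        intro hmem
        rw [List.mem_map] at hmem
        obtain ⟨i, hi, hie⟩ := hmem
        rw [List.mem_range] at hi
        exact hj0min i (by omega) hie
      have hcnt : ¬ ¬ PySem.List.count
          ((List.range (m + 1)).map (fun i => (orbitPair number_list digits_n base i).1)) v = 0 := by
        rw [PySem.List.count_eq]
        simpa [List.count_eq_zero] using hnmem
      rw [if_neg hcnt, if_neg hlt]
      have happ : ((List.range (m + 1)).map (fun i => (orbitPair number_list digits_n base i).1)) ++ [v]
          = (List.range (m + 2)).map (fun i => (orbitPair number_list digits_n base i).1) := by
        rw [List.range_succ (n := m + 1)]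
        simp [hvdef]
      rw [happ]
      exact ih (m + 1)

-- ===== VERDICT (by name: the statement is the Claim_ definition above) =====
theorem build_kaprekar_sequence_spec : Claim_equal_build_kaprekar_sequence := by
  intro number_list digits_n base _hdom hpre
  unfold Spec_build_kaprekar_sequence
  unfold build_kaprekar_sequence build_kaprekar_sequence_alt
  have := a_loop_eq_bk_loop number_list digits_n base hpre 2000000000 0
  simpa [convert_list_to_int, orbitPair] using this
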